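-- pv_equiv track=rewrite | github.com/Racim230/Mon-Portfolio | stochastiquetest3.py | mise_a_jour_politique
-- ===== SOURCE A (Python) =====
-- def mise_a_jour_politique(tableau, n, delta, x):
--     nouvelle_politique = []
--     for i in range(n):
--         max_val = -float('inf')
--         meilleur_decision = 1
--         for j in range(delta[i]):
--             # Calcul de la valeur totale pour chaque décision
--             val = sum(x[k] * p_ij[k] for k, p_ij in enumerate(tableau) if tableau[k][0] == i + 1 and tableau[k][1] == j + 1)
--             if val > max_val:
--                 max_val = val
--                 meilleur_decision = j + 1
--         nouvelle_politique.append(meilleur_decision)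
--     return nouvelle_politique
-- ===== SOURCE B (Python) =====
-- def mise_a_jour_politique(tableau, n, delta, x):
--     # One pass over tableau: accumulate the value of each (state, decision) pair
--     # into a dict, then each inner scan of A becomes a single dict lookup.
--     totals = {}
--     for k, row in enumerate(tableau):
--         if len(row) >= 2:
--             s, d = row[0], row[1]
--             if 1 <= s <= n and 1 <= d <= delta[s - 1]:
--                 totals[(s, d)] = totals.get((s, d), 0) + x[k] * row[k]
--     politique = []
--     for i in range(n):
--         best, best_val = 1, None
--         for j in range(delta[i]):
--             v = totals.get((i + 1, j + 1), 0)
--             if best_val is None or v > best_val: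
--                 best, best_val = j + 1, v
--         politique.append(best)
--     return politique
-- ===== Notes on version B (the rewrite author's own statement) =====
-- stated objective: faster
-- what changed: A recomputes, for every state i and decision j, a full scan of tableau to sum matching x[k]*row[k]; B makes one pass over tableau accumulating the value of each (state, decision) pair into a dict and replaces each inner scan by a single dict lookup.
import Mathlib
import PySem

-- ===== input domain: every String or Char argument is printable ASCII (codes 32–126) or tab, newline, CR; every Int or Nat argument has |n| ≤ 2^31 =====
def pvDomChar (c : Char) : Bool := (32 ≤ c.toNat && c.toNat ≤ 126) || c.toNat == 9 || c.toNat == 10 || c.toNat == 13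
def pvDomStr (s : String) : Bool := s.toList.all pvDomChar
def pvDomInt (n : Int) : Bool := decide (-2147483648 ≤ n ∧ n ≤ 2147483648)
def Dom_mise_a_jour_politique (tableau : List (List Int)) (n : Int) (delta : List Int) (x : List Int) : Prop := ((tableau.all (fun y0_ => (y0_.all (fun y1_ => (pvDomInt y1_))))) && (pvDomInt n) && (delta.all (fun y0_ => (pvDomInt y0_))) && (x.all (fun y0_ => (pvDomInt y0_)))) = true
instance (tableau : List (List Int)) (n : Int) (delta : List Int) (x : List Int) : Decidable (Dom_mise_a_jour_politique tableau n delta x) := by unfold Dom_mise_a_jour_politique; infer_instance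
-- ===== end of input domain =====

-- B replaces A's inner scan of the whole tableau (per state i and decision j) by one
-- precomputation pass that sums each (state, decision) value into a dict, then a lookup.

-- ===== PORT A =====
-- the generator-sum: sum(x[k] * p_ij[k] for k, p_ij in enumerate(tableau) if tableau[k][0] == i+1 and tableau[k][1] == j+1)
def pvValA (tableau : List (List Int)) (x : List Int) (i j : Int) : Int :=
  (PySem.List.enumerate tableau 0).foldl
    (fun acc kr =>
      if PySem.List.pyGetD kr.2 0 0 = i + 1 ∧ PySem.List.pyGetD kr.2 1 0 = j + 1 then
        acc + PySem.List.pyGetD x kr.1 0 * PySem.List.pyGetD kr.2 kr.1 0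
      else acc) 0

def mise_a_jour_politique (tableau : List (List Int)) (n : Int) (delta : List Int) (x : List Int) : List Int :=
  (PySem.List.pyRange 0 n 1).foldl
    (fun pol i =>
      -- max_val = -inf is the `none` state: any first val beats it
      let st := (PySem.List.pyRange 0 (PySem.List.pyGetD delta i 0) 1).foldl
        (fun (st : Option Int × Int) j =>
          let val := pvValA tableau x i j
          match st.1 with
          | none => (some val, j + 1)
          | some m => if m < val then (some val, j + 1) else st)
        (none, 1)
      pol ++ [st.2]) []

-- ===== PORT B =====
def pvStepB (n : Int) (delta x : List Int) (d : PySem.Dict (Int × Int) Int) (kr : Int × List Int) : PySem.Dict (Int × Int) Int :=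
  if 2 ≤ kr.2.length then
    if 1 ≤ PySem.List.pyGetD kr.2 0 0 ∧ PySem.List.pyGetD kr.2 0 0 ≤ n ∧
        1 ≤ PySem.List.pyGetD kr.2 1 0 ∧
        PySem.List.pyGetD kr.2 1 0 ≤ PySem.List.pyGetD delta (PySem.List.pyGetD kr.2 0 0 - 1) 0 then
      d.insert (PySem.List.pyGetD kr.2 0 0, PySem.List.pyGetD kr.2 1 0)
        (d.getD (PySem.List.pyGetD kr.2 0 0, PySem.List.pyGetD kr.2 1 0) 0 +
          PySem.List.pyGetD x kr.1 0 * PySem.List.pyGetD kr.2 kr.1 0)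
    else d
  else d

def mise_a_jour_politique_alt (tableau : List (List Int)) (n : Int) (delta : List Int) (x : List Int) : List Int :=
  let totals := (PySem.List.enumerate tableau 0).foldl (pvStepB n delta x) PySem.Dict.empty
  (PySem.List.pyRange 0 n 1).foldl
    (fun pol i =>
      let st := (PySem.List.pyRange 0 (PySem.List.pyGetD delta i 0) 1).foldl
        (fun (st : Int × Option Int) j =>
          let v := totals.getD (i + 1, j + 1) 0
          match st.2 with
          | none => (j + 1, some v)
          | some m => if m < v then (j + 1, some v) else st)
        (1, none)
      pol ++ [st.1]) []

-- ===== PRECONDITION & SPEC =====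
-- Pre_ excludes exactly the inputs on which Python A raises (IndexError): n beyond
-- len(delta); an empty row when some state has a positive decision count (its `tableau[k][0]`
-- is evaluated); a 1-element row whose state is live (its `tableau[k][1]` is evaluated);
-- and a matched row k whose x[k] or row[k] is out of range.
def Pre_mise_a_jour_politique (tableau : List (List Int)) (n : Int) (delta : List Int) (x : List Int) : Prop :=
  n ≤ (delta.length : Int) ∧
  ((∃ i ∈ PySem.List.pyRange 0 n 1, 1 ≤ PySem.List.pyGetD delta i 0) → ∀ row ∈ tableau, row ≠ []) ∧
  (∀ row ∈ tableau,
    (row ≠ [] ∧ 1 ≤ PySem.List.pyGetD row 0 0 ∧ PySem.List.pyGetD row 0 0 ≤ n ∧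
      1 ≤ PySem.List.pyGetD delta (PySem.List.pyGetD row 0 0 - 1) 0) → 2 ≤ row.length) ∧
  (∀ kr ∈ PySem.List.enumerate tableau 0,
    (2 ≤ kr.2.length ∧ 1 ≤ PySem.List.pyGetD kr.2 0 0 ∧ PySem.List.pyGetD kr.2 0 0 ≤ n ∧
      1 ≤ PySem.List.pyGetD kr.2 1 0 ∧
      PySem.List.pyGetD kr.2 1 0 ≤ PySem.List.pyGetD delta (PySem.List.pyGetD kr.2 0 0 - 1) 0) →
      (kr.1 < (x.length : Int) ∧ kr.1 < (kr.2.length : Int)))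

instance (tableau : List (List Int)) (n : Int) (delta : List Int) (x : List Int) : Decidable (Pre_mise_a_jour_politique tableau n delta x) := by unfold Pre_mise_a_jour_politique; infer_instance

def pvWitness_mise_a_jour_politique : List (List Int) × Int × List Int × List Int :=
  ([[1, 1, 5], [2, 1, 3]], 2, [1, 2], [2, 3])

def Spec_mise_a_jour_politique (tableau : List (List Int)) (n : Int) (delta : List Int) (x : List Int) (out : List Int) : Prop := out = mise_a_jour_politique_alt tableau n delta x
instance (tableau : List (List Int)) (n : Int) (delta : List Int) (x : List Int) (out : List Int) : Decidable (Spec_mise_a_jour_politique tableau n delta x out) := by unfold Spec_mise_a_jour_politique; infer_instance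

-- ===== CLAIM (what is proved, stated in full; the proofs are below) =====
def Claim_equal_mise_a_jour_politique : Prop := ∀ (tableau : List (List Int)) (n : Int) (delta : List Int) (x : List Int), Dom_mise_a_jour_politique tableau n delta x → Pre_mise_a_jour_politique tableau n delta x → Spec_mise_a_jour_politique tableau n delta x (mise_a_jour_politique tableau n delta x)

-- ===== LEMMAS AND PROOFS =====

-- A's generator term for one enumerated row
def pvContrib (x : List Int) (i j : Int) (kr : Int × List Int) : Int :=
  if PySem.List.pyGetD kr.2 0 0 = i + 1 ∧ PySem.List.pyGetD kr.2 1 0 = j + 1 then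
    PySem.List.pyGetD x kr.1 0 * PySem.List.pyGetD kr.2 kr.1 0
  else 0

theorem pvValA_eq_sum (tableau : List (List Int)) (x : List Int) (i j : Int) :
    pvValA tableau x i j = ((PySem.List.enumerate tableau 0).map (pvContrib x i j)).sum := by
  unfold pvValA
  generalize PySem.List.enumerate tableau 0 = l
  suffices h : ∀ (l : List (Int × List Int)) (a : Int),
      l.foldl (fun acc kr =>
        if PySem.List.pyGetD kr.2 0 0 = i + 1 ∧ PySem.List.pyGetD kr.2 1 0 = j + 1 then
          acc + PySem.List.pyGetD x kr.1 0 * PySem.List.pyGetD kr.2 kr.1 0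
        else acc) a = a + (l.map (pvContrib x i j)).sum by
    simpa using h l 0
  intro l
  induction l with
  | nil => intro a; simp
  | cons kr l ih =>
    intro a
    simp only [List.foldl_cons, List.map_cons, List.sum_cons, ih, pvContrib]
    split_ifs <;> ring

-- a row whose second entry reads nonzero really has length ≥ 2
theorem pv_len2_of_snd_ne (row : List Int) (h : PySem.List.pyGetD row 1 0 ≠ 0) : 2 ≤ row.length := by
  by_contra hlt
  apply h
  match row, hlt with
  | [], _ => simp [PySem.List.pyGetD, PySem.List.pyGet?, PySem.List.pyIdx?]
  | [a], _ => simp [PySem.List.pyGetD, PySem.List.pyGet?, PySem.List.pyIdx?]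
  | a :: b :: r, hlt => simp at hlt

-- the dict built by B holds, at each in-range key (i+1, j+1), A's generator sum
theorem pv_totals_getD (n : Int) (delta x : List Int) (i j : Int)
    (hi0 : 0 ≤ i) (hin : i < n) (hj0 : 0 ≤ j) (hjd : j < PySem.List.pyGetD delta i 0) :
    ∀ (l : List (Int × List Int)) (d0 : PySem.Dict (Int × Int) Int),
      (l.foldl (pvStepB n delta x) d0).getD (i + 1, j + 1) 0
        = d0.getD (i + 1, j + 1) 0 + (l.map (pvContrib x i j)).sum := by
  intro l
  induction l with
  | nil => intro d0; simp
  | cons kr l ih =>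
    intro d0
    simp only [List.foldl_cons, List.map_cons, List.sum_cons, ih]
    have hkey : (pvStepB n delta x d0 kr).getD (i + 1, j + 1) 0
        = d0.getD (i + 1, j + 1) 0 + pvContrib x i j kr := by
      unfold pvStepB pvContrib
      by_cases hm : PySem.List.pyGetD kr.2 0 0 = i + 1 ∧ PySem.List.pyGetD kr.2 1 0 = j + 1
      · -- matched row: its key is exactly (i+1, j+1) and B's guards hold
        have hlen : 2 ≤ kr.2.length := by
          apply pv_len2_of_snd_ne
          rw [hm.2]; omega
        have hg : 1 ≤ PySem.List.pyGetD kr.2 0 0 ∧ PySem.List.pyGetD kr.2 0 0 ≤ n ∧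
            1 ≤ PySem.List.pyGetD kr.2 1 0 ∧
            PySem.List.pyGetD kr.2 1 0 ≤ PySem.List.pyGetD delta (PySem.List.pyGetD kr.2 0 0 - 1) 0 := by
          rw [hm.1, hm.2]
          refine ⟨by omega, by omega, by omega, ?_⟩
          have : i + 1 - 1 = i := by ring
          rw [this]; omega
        rw [if_pos hlen, if_pos hg, if_pos hm, hm.1, hm.2]
        simp
      · -- unmatched row: either skipped, or inserted at a different key
        have hne : ((PySem.List.pyGetD kr.2 0 0, PySem.List.pyGetD kr.2 1 0) : Int × Int) ≠ (i + 1, j + 1) := by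
          intro he
          exact hm ⟨congrArg Prod.fst he, congrArg Prod.snd he⟩
        rw [if_neg hm]
        by_cases h1 : 2 ≤ kr.2.length
        · rw [if_pos h1]
          split_ifs with hg
          · rw [PySem.Dict.getD_insert, if_neg (Ne.symm hne)]; ring
          · ring
        · rw [if_neg h1]; ring
    rw [hkey]; ring

-- the two argmax loops are each other's swap when the per-j values agree
theorem pv_inner_swap (vA vB : Int → Int) :
    ∀ (js : List Int), (∀ j ∈ js, vA j = vB j) → ∀ (c : Int) (m : Option Int),
      js.foldl (fun (st : Int × Option Int) j =>
          let v := vB j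
          match st.2 with
          | none => (j + 1, some v)
          | some mm => if mm < v then (j + 1, some v) else st) (c, m)
        = Prod.swap (js.foldl (fun (st : Option Int × Int) j =>
          let val := vA j
          match st.1 with
          | none => (some val, j + 1)
          | some mm => if mm < val then (some val, j + 1) else st) (m, c)) := by
  intro js
  induction js with
  | nil => intro _ c m; rfl
  | cons j js ih =>
    intro h c m
    have hj : vA j = vB j := h j (by simp)
    have hrest : ∀ j' ∈ js, vA j' = vB j' := fun j' hj' => h j' (by simp [hj'])
    simp only [List.foldl_cons]
    cases m with
    | none => simp only [← hj]; exact ih hrest _ _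
    | some mm =>
      simp only [← hj]
      by_cases hc : mm < vA j
      · rw [if_pos hc, if_pos hc]; exact ih hrest _ _
      · rw [if_neg hc, if_neg hc]; exact ih hrest _ _

-- ===== VERDICT (by name: the statement is the Claim_ definition above) =====
theorem mise_a_jour_politique_spec : Claim_equal_mise_a_jour_politique := by
  intro tableau n delta x _hdom _hpre
  unfold Spec_mise_a_jour_politique mise_a_jour_politique mise_a_jour_politique_alt
  apply PySem.List.foldl_congr_mem
  intro pol i hi
  have hi' : 0 ≤ i ∧ i < n := (PySem.List.mem_pyRange_one).1 hi
  have hval : ∀ j ∈ PySem.List.pyRange 0 (PySem.List.pyGetD delta i 0) 1,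
      pvValA tableau x i j
        = ((PySem.List.enumerate tableau 0).foldl (pvStepB n delta x) PySem.Dict.empty).getD (i + 1, j + 1) 0 := by
    intro j hj
    have hj' : 0 ≤ j ∧ j < PySem.List.pyGetD delta i 0 := (PySem.List.mem_pyRange_one).1 hj
    rw [pvValA_eq_sum, pv_totals_getD n delta x i j hi'.1 hi'.2 hj'.1 hj'.2]
    simp
  have := pv_inner_swap (pvValA tableau x i)
    (fun j => ((PySem.List.enumerate tableau 0).foldl (pvStepB n delta x) PySem.Dict.empty).getD (i + 1, j + 1) 0)
    (PySem.List.pyRange 0 (PySem.List.pyGetD delta i 0) 1) hval 1 none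
  simp only [this, Prod.fst_swap]
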